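-- pv_equiv track=rewrite | github.com/ccalu/.openclaw | workspace/content_factory_block2/S4/helpers/target_builder.py | _pick_best_type
-- ===== SOURCE A (Python) =====
-- ENTITY_TYPE_MAP = {
--     "person": "person_historical",
--     "location": "location_historical",
--     "environment": "environment_reference",
--     "architectural_complex": "architectural_anchor",
--     "interior_venue": "interior_space",
--     "object": "object_artifact",
--     "artifact": "object_artifact",
--     "vehicle": "object_artifact",
--     "prop": "object_artifact",
--     "symbolic_event": "symbolic_sequence",
--     "event": "event_reference",
--     "symbolic_action": "symbolic_sequence",
--     "atmospheric_phenomenon": "event_reference",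
--     "landscape_feature": "environment_reference",
--     "interior_element": "interior_space",
--     "gaming_object": "object_artifact",
--     "building_material": "object_artifact",
--     "architectural_element": "object_artifact",
-- }
--
-- def _map_target_type(entity_type: str) -> str:
--     return ENTITY_TYPE_MAP.get(entity_type, "object_artifact")
--
-- def _pick_best_type(entities_in_group: list) -> str:
--     """Pick the most specific target_type from a group of merged entities."""
--     type_priority = [
--         "architectural_anchor", "person_historical", "location_historical",
--         "interior_space", "environment_reference", "object_artifact",
--         "event_reference", "symbolic_sequence",
--     ]
--     mapped_types = [_map_target_type(e["entity_type"]) for e in entities_in_group]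
--     for t in type_priority:
--         if t in mapped_types:
--             return t
--     return mapped_types[0] if mapped_types else "object_artifact"
-- ===== SOURCE B (Python) =====
-- ENTITY_TYPE_MAP = {
--     "person": "person_historical",
--     "location": "location_historical",
--     "environment": "environment_reference",
--     "architectural_complex": "architectural_anchor",
--     "interior_venue": "interior_space",
--     "object": "object_artifact",
--     "artifact": "object_artifact",
--     "vehicle": "object_artifact",
--     "prop": "object_artifact",
--     "symbolic_event": "symbolic_sequence",
--     "event": "event_reference",
--     "symbolic_action": "symbolic_sequence",
--     "atmospheric_phenomenon": "event_reference",
--     "landscape_feature": "environment_reference",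
--     "interior_element": "interior_space",
--     "gaming_object": "object_artifact",
--     "building_material": "object_artifact",
--     "architectural_element": "object_artifact",
-- }
--
-- _TYPE_PRIORITY = [
--     "architectural_anchor", "person_historical", "location_historical",
--     "interior_space", "environment_reference", "object_artifact",
--     "event_reference", "symbolic_sequence",
-- ]
-- _RANK = {t: i for i, t in enumerate(_TYPE_PRIORITY)}
-- # Fused table: entity_type -> priority rank of its mapped target type.
-- _ENTITY_RANK = {k: _RANK[v] for k, v in ENTITY_TYPE_MAP.items()}
-- _DEFAULT_RANK = _RANK["object_artifact"]
--
--
-- def _pick_best_type(entities_in_group: list) -> str: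
--     """Pick the most specific target_type from a group of merged entities."""
--     best = len(_TYPE_PRIORITY)
--     for e in entities_in_group:
--         r = _ENTITY_RANK.get(e["entity_type"], _DEFAULT_RANK)
--         if r < best:
--             best = r
--     return _TYPE_PRIORITY[best] if best < len(_TYPE_PRIORITY) else "object_artifact"
-- ===== Notes on version B (the rewrite author's own statement) =====
-- stated objective: alternative
-- what changed: Replaces A's scan of the priority list with membership tests against the mapped-types list by one running-minimum pass over the entities using a precomputed fused entity_type->priority-rank table, indexing the priority list by the final minimum rank (8 = empty-group sentinel -> 'object_artifact').
import Mathlib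
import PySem

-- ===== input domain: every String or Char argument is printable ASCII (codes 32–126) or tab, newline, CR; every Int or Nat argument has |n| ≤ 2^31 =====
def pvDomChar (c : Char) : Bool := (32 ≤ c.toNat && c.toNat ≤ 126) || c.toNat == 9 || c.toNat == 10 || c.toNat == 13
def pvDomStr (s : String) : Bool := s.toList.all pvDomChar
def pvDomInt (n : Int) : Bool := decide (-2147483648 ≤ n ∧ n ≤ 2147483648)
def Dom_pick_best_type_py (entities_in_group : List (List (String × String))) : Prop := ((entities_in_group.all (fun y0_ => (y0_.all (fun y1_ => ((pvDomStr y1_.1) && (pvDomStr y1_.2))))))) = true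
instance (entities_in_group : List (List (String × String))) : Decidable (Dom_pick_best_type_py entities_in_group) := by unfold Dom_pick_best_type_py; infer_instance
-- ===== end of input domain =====

-- B replaces A's priority-list scan with membership tests by one running-minimum pass over the entities using a fused entity_type->rank table, indexing the priority list at the end (equivalence is about the return value).


-- ENTITY_TYPE_MAP: the SAME module constant in Source A and Source B; defined once, used by both ports
def pvEntityTypeMap : PySem.Dict String String := PySem.Dict.mk [
  ("person", "person_historical"), ("location", "location_historical"),
  ("environment", "environment_reference"), ("architectural_complex", "architectural_anchor"),
  ("interior_venue", "interior_space"), ("object", "object_artifact"),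
  ("artifact", "object_artifact"), ("vehicle", "object_artifact"),
  ("prop", "object_artifact"), ("symbolic_event", "symbolic_sequence"),
  ("event", "event_reference"), ("symbolic_action", "symbolic_sequence"),
  ("atmospheric_phenomenon", "event_reference"), ("landscape_feature", "environment_reference"),
  ("interior_element", "interior_space"), ("gaming_object", "object_artifact"),
  ("building_material", "object_artifact"), ("architectural_element", "object_artifact")]

-- the identical 8-element priority literal appearing in Source A (type_priority) and Source B (_TYPE_PRIORITY)
def pvTypePriority : List String :=
  ["architectural_anchor", "person_historical", "location_historical",
   "interior_space", "environment_reference", "object_artifact",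
   "event_reference", "symbolic_sequence"]

-- ===== PORT A =====
def pvMapTargetA (entity_type : String) : String :=
  PySem.Dict.getD pvEntityTypeMap entity_type "object_artifact"

-- the 'for t in type_priority: if t in mapped_types: return t' loop
def pvFindFirstA (mapped : List String) : List String → Option String
  | [] => none
  | t :: ts => if mapped.contains t then some t else pvFindFirstA mapped ts

def pick_best_type_py (entities_in_group : List (List (String × String))) : String :=
  -- e["entity_type"] raises KeyError when the key is absent; Pre_ excludes those inputs, so the "" default is never reached under Pre_
  let mapped := entities_in_group.map (fun e => pvMapTargetA (((PySem.Dict.mk e).get? "entity_type").getD ""))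
  match pvFindFirstA mapped pvTypePriority with
  | some t => t
  | none => mapped.headD "object_artifact"

-- ===== PORT B =====
-- _RANK = {t: i for i, t in enumerate(_TYPE_PRIORITY)}
def pvRankB : PySem.Dict String Int :=
  (PySem.List.enumerate pvTypePriority 0).foldl (fun d p => d.insert p.2 p.1) PySem.Dict.empty

-- _RANK[v] / _RANK["object_artifact"]: the key is always a priority type, so KeyError never fires and the 0 default is unreachable
def pvRankOfB (t : String) : Int := PySem.Dict.getD pvRankB t 0

-- _ENTITY_RANK = {k: _RANK[v] for k, v in ENTITY_TYPE_MAP.items()}  (distinct keys, so Dict.mk of the mapped items)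
def pvEntityRankB : PySem.Dict String Int :=
  PySem.Dict.mk (pvEntityTypeMap.items.map (fun kv => (kv.1, pvRankOfB kv.2)))

def pvDefaultRankB : Int := pvRankOfB "object_artifact"

def pick_best_type_py_alt (entities_in_group : List (List (String × String))) : String :=
  -- e["entity_type"] raises KeyError when the key is absent; Pre_ excludes those inputs, so the "" default is never reached under Pre_
  let best := entities_in_group.foldl
    (fun best e =>
      let r := PySem.Dict.getD pvEntityRankB (((PySem.Dict.mk e).get? "entity_type").getD "") pvDefaultRankB
      if r < best then r else best)
    (PySem.List.len pvTypePriority)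
  if best < PySem.List.len pvTypePriority then
    -- _TYPE_PRIORITY[best]: in range under the guard (0 ≤ best always), so IndexError never fires
    (PySem.List.pyGet? pvTypePriority best).getD "object_artifact"
  else "object_artifact"

-- ===== PRECONDITION & SPEC =====
-- Pre_ excludes exactly the entities lacking the "entity_type" key, on which Python A raises KeyError.
def Pre_pick_best_type_py (entities_in_group : List (List (String × String))) : Prop :=
  ∀ e ∈ entities_in_group, ((PySem.Dict.mk e).get? "entity_type").isSome = true
instance (entities_in_group : List (List (String × String))) : Decidable (Pre_pick_best_type_py entities_in_group) := by unfold Pre_pick_best_type_py; infer_instance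

def pvWitness_pick_best_type_py : (List (List (String × String))) :=
  ([[("entity_type", "person")], [("entity_type", "vehicle")]])

def Spec_pick_best_type_py (entities_in_group : List (List (String × String))) (out : String) : Prop := out = pick_best_type_py_alt entities_in_group
instance (entities_in_group : List (List (String × String))) (out : String) : Decidable (Spec_pick_best_type_py entities_in_group out) := by unfold Spec_pick_best_type_py; infer_instance

-- ===== CLAIM (what is proved, stated in full; the proofs are below) =====
def Claim_equal_pick_best_type_py : Prop := ∀ (entities_in_group : List (List (String × String))), Dom_pick_best_type_py entities_in_group → Pre_pick_best_type_py entities_in_group → Spec_pick_best_type_py entities_in_group (pick_best_type_py entities_in_group)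

-- ===== LEMMAS AND PROOFS =====

-- every value _map_target_type can return is one of the eight priority types
theorem pvMapTargetA_mem (t : String) : pvMapTargetA t ∈ pvTypePriority := by
  rcases h : PySem.Dict.get? pvEntityTypeMap t with _ | v
  · simp [pvMapTargetA, PySem.Dict.getD_eq_get?_getD, h, pvTypePriority]
  · have hm := PySem.Dict.mem_items_of_get?_eq_some _ h
    simp only [pvEntityTypeMap, List.mem_cons, Prod.mk.injEq,
      List.not_mem_nil, or_false] at hm
    simp only [pvMapTargetA, PySem.Dict.getD_eq_get?_getD, h, Option.getD_some]
    rcases hm with ⟨-, rfl⟩ | ⟨-, rfl⟩ | ⟨-, rfl⟩ | ⟨-, rfl⟩ | ⟨-, rfl⟩ | ⟨-, rfl⟩ |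
      ⟨-, rfl⟩ | ⟨-, rfl⟩ | ⟨-, rfl⟩ | ⟨-, rfl⟩ | ⟨-, rfl⟩ | ⟨-, rfl⟩ | ⟨-, rfl⟩ |
      ⟨-, rfl⟩ | ⟨-, rfl⟩ | ⟨-, rfl⟩ | ⟨-, rfl⟩ | ⟨-, rfl⟩ <;> decide

-- first-match lookup commutes with mapping the values (B's dict comprehension over ENTITY_TYPE_MAP.items())
theorem pv_get?_mk_map (l : List (String × String)) (g : String → Int) (k : String) :
    (PySem.Dict.mk (l.map (fun kv => (kv.1, g kv.2)))).get? k = ((PySem.Dict.mk l).get? k).map g := by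
  induction l with
  | nil => rfl
  | cons p rest ih =>
    obtain ⟨a, b⟩ := p
    simp only [List.map_cons, PySem.Dict.get?_mk_cons]
    split_ifs <;> simp [ih]

-- B's fused per-entity rank agrees with rank-of-mapped-type on EVERY key string
theorem pv_fused (k : String) :
    PySem.Dict.getD pvEntityRankB k pvDefaultRankB = pvRankOfB (pvMapTargetA k) := by
  rw [PySem.Dict.getD_eq_get?_getD, pvEntityRankB, pv_get?_mk_map]
  rcases h : PySem.Dict.get? pvEntityTypeMap k with _ | v <;>
    simp [h, pvMapTargetA, PySem.Dict.getD_eq_get?_getD, pvDefaultRankB]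

-- a priority type strictly better-ranked than a rank-minimal element cannot occur in the mapped list
theorem pv_not_mem (ms : List String) (m u : String)
    (hmin : ∀ y ∈ ms, pvRankOfB m ≤ pvRankOfB y) (h : pvRankOfB u < pvRankOfB m) :
    u ∉ ms := fun hu => absurd (hmin u hu) (by omega)

-- the priority-scan of A returns exactly a rank-minimal element of the mapped list
theorem pv_ff (ms : List String) (m : String) (hm : m ∈ ms)
    (hmp : m ∈ pvTypePriority)
    (hmin : ∀ y ∈ ms, pvRankOfB m ≤ pvRankOfB y) :
    pvFindFirstA ms pvTypePriority = some m := by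
  simp only [pvTypePriority, List.mem_cons, List.not_mem_nil, or_false] at hmp
  rcases hmp with rfl | rfl | rfl | rfl | rfl | rfl | rfl | rfl
  · simp [pvFindFirstA, pvTypePriority, hm]
  · simp [pvFindFirstA, pvTypePriority, hm,
      pv_not_mem ms _ "architectural_anchor" hmin (by decide)]
  · simp [pvFindFirstA, pvTypePriority, hm,
      pv_not_mem ms _ "architectural_anchor" hmin (by decide),
      pv_not_mem ms _ "person_historical" hmin (by decide)]
  · simp [pvFindFirstA, pvTypePriority, hm,
      pv_not_mem ms _ "architectural_anchor" hmin (by decide),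
      pv_not_mem ms _ "person_historical" hmin (by decide),
      pv_not_mem ms _ "location_historical" hmin (by decide)]
  · simp [pvFindFirstA, pvTypePriority, hm,
      pv_not_mem ms _ "architectural_anchor" hmin (by decide),
      pv_not_mem ms _ "person_historical" hmin (by decide),
      pv_not_mem ms _ "location_historical" hmin (by decide),
      pv_not_mem ms _ "interior_space" hmin (by decide)]
  · simp [pvFindFirstA, pvTypePriority, hm,
      pv_not_mem ms _ "architectural_anchor" hmin (by decide),
      pv_not_mem ms _ "person_historical" hmin (by decide),
      pv_not_mem ms _ "location_historical" hmin (by decide),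
      pv_not_mem ms _ "interior_space" hmin (by decide),
      pv_not_mem ms _ "environment_reference" hmin (by decide)]
  · simp [pvFindFirstA, pvTypePriority, hm,
      pv_not_mem ms _ "architectural_anchor" hmin (by decide),
      pv_not_mem ms _ "person_historical" hmin (by decide),
      pv_not_mem ms _ "location_historical" hmin (by decide),
      pv_not_mem ms _ "interior_space" hmin (by decide),
      pv_not_mem ms _ "environment_reference" hmin (by decide),
      pv_not_mem ms _ "object_artifact" hmin (by decide)]
  · simp [pvFindFirstA, pvTypePriority, hm,
      pv_not_mem ms _ "architectural_anchor" hmin (by decide),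
      pv_not_mem ms _ "person_historical" hmin (by decide),
      pv_not_mem ms _ "location_historical" hmin (by decide),
      pv_not_mem ms _ "interior_space" hmin (by decide),
      pv_not_mem ms _ "environment_reference" hmin (by decide),
      pv_not_mem ms _ "object_artifact" hmin (by decide),
      pv_not_mem ms _ "event_reference" hmin (by decide)]

-- the priority types have rank < 8 and indexing the priority list at their rank recovers them
theorem pv_rank_cases (m : String) (h : m ∈ pvTypePriority) :
    pvRankOfB m < 8 ∧ (PySem.List.pyGet? pvTypePriority (pvRankOfB m)).getD "object_artifact" = m := by
  simp only [pvTypePriority, List.mem_cons, List.not_mem_nil, or_false] at h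
  rcases h with rfl | rfl | rfl | rfl | rfl | rfl | rfl | rfl <;> exact ⟨by decide, by decide⟩

-- the running-minimum fold: bounded by its start, a lower bound of all ranks, and attained at the start or at some element
theorem pv_fold (ms : List String) (b : Int) :
    ms.foldl (fun b s => if pvRankOfB s < b then pvRankOfB s else b) b ≤ b ∧
    (∀ y ∈ ms, ms.foldl (fun b s => if pvRankOfB s < b then pvRankOfB s else b) b ≤ pvRankOfB y) ∧
    (ms.foldl (fun b s => if pvRankOfB s < b then pvRankOfB s else b) b = b ∨
      ∃ y ∈ ms, ms.foldl (fun b s => if pvRankOfB s < b then pvRankOfB s else b) b = pvRankOfB y) := by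
  induction ms generalizing b with
  | nil => simp
  | cons x t ih =>
    simp only [List.foldl_cons, List.mem_cons]
    by_cases hx : pvRankOfB x < b <;> simp only [hx, if_pos, if_neg, not_false_iff]
    · obtain ⟨h1, h2, h3⟩ := ih (pvRankOfB x)
      refine ⟨by omega, ?_, ?_⟩
      · rintro y (rfl | hy)
        · exact h1
        · exact h2 y hy
      · rcases h3 with h | ⟨y, hy, h⟩
        · exact Or.inr ⟨x, Or.inl rfl, h⟩
        · exact Or.inr ⟨y, Or.inr hy, h⟩
    · obtain ⟨h1, h2, h3⟩ := ih b
      refine ⟨h1, ?_, ?_⟩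
      · rintro y (rfl | hy)
        · omega
        · exact h2 y hy
      · rcases h3 with h | ⟨y, hy, h⟩
        · exact Or.inl h
        · exact Or.inr ⟨y, Or.inr hy, h⟩

-- A's scan and B's running-minimum agree on any list of priority types
theorem pv_core (ms : List String) (hall : ∀ s ∈ ms, s ∈ pvTypePriority) :
    (match pvFindFirstA ms pvTypePriority with
     | some t => t
     | none => ms.headD "object_artifact") =
    (let best := ms.foldl (fun b s => if pvRankOfB s < b then pvRankOfB s else b) (PySem.List.len pvTypePriority)
     if best < PySem.List.len pvTypePriority then
       (PySem.List.pyGet? pvTypePriority best).getD "object_artifact"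
     else "object_artifact") := by
  cases ms with
  | nil => decide
  | cons x t =>
    obtain ⟨hle, hlow, hatt⟩ := pv_fold (x :: t) (PySem.List.len pvTypePriority)
    rcases hatt with h8 | ⟨y, hy, hy'⟩
    · -- impossible: the fold is ≤ rank x < 8
      exact absurd (hlow x (List.mem_cons_self)) (by
        rw [h8]
        have := (pv_rank_cases x (hall x List.mem_cons_self)).1
        have hlen : PySem.List.len pvTypePriority = 8 := by decide
        omega)
    · -- the fold hits the rank of a minimal element y; A's scan returns y and so does B's indexing
      have hymem : y ∈ pvTypePriority := hall y hy
      have hmin : ∀ z ∈ x :: t, pvRankOfB y ≤ pvRankOfB z := fun z hz => hy' ▸ hlow z hz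
      obtain ⟨hylt, hyidx⟩ := pv_rank_cases y hymem
      rw [pv_ff (x :: t) y hy hymem hmin, hy']
      have hguard : pvRankOfB y < PySem.List.len pvTypePriority := by
        have hlen : PySem.List.len pvTypePriority = 8 := by decide
        omega
      simp only [hguard, if_pos, hyidx]

-- ===== VERDICT (by name: the statement is the Claim_ definition above) =====
theorem pick_best_type_py_spec : Claim_equal_pick_best_type_py := by
  intro entities _hdom _hpre
  show (match pvFindFirstA
          (entities.map (fun e => pvMapTargetA (((PySem.Dict.mk e).get? "entity_type").getD "")))
          pvTypePriority with
        | some t => t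
        | none => (entities.map (fun e => pvMapTargetA (((PySem.Dict.mk e).get? "entity_type").getD ""))).headD "object_artifact")
      = pick_best_type_py_alt entities
  rw [pv_core _ (by
    intro s hs
    rcases List.mem_map.mp hs with ⟨e, _, rfl⟩
    exact pvMapTargetA_mem _)]
  show _ = pick_best_type_py_alt entities
  unfold pick_best_type_py_alt
  rw [List.foldl_map]
  have hfun : (fun (b : Int) (e : List (String × String)) =>
        if pvRankOfB (pvMapTargetA (((PySem.Dict.mk e).get? "entity_type").getD "")) < b
        then pvRankOfB (pvMapTargetA (((PySem.Dict.mk e).get? "entity_type").getD "")) else b) =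
      (fun (b : Int) (e : List (String × String)) =>
        let r := PySem.Dict.getD pvEntityRankB (((PySem.Dict.mk e).get? "entity_type").getD "") pvDefaultRankB
        if r < b then r else b) := by
    funext b e
    simp only [pv_fused]
  rw [hfun]
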